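-- pv_equiv track=rewrite | github.com/FrancoARossi/SySdL-TPs | pruebas.py | a_ErrorIDNum
-- ===== SOURCE A (Python) =====
-- def a_ErrorIDNum (word):
-- 	s = 0
-- 	c = word[0]
-- 	if c.isalpha() :
-- 		s = 1
-- 		for c in word :
-- 			if c.isalpha():
-- 				s = 1
-- 			elif s == 1 and c.isdigit():
-- 				s = 2
-- 				break
-- 	elif c.isdigit() :
-- 		s = 1
-- 		for c in word :
-- 			if c.isdigit():
-- 				s = 1
-- 			elif s == 1 and c.isalpha():
-- 				s = 2
-- 				break
-- 	return (s == 2)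
-- ===== SOURCE B (Python) =====
-- def a_ErrorIDNum(word):
--     first = word[0]
--     if not (first.isalpha() or first.isdigit()):
--         return False
--     has_alpha = any(ch.isalpha() for ch in word)
--     has_digit = any(ch.isdigit() for ch in word)
--     return has_alpha and has_digit
-- ===== Notes on version B (the rewrite author's own statement) =====
-- stated objective: simpler
-- what changed: Replaced the branch-specific transition state machine with break by a first-character class guard plus two independent existence scans (any alpha, any digit) whose conjunction is returned.
import Mathlib
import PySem

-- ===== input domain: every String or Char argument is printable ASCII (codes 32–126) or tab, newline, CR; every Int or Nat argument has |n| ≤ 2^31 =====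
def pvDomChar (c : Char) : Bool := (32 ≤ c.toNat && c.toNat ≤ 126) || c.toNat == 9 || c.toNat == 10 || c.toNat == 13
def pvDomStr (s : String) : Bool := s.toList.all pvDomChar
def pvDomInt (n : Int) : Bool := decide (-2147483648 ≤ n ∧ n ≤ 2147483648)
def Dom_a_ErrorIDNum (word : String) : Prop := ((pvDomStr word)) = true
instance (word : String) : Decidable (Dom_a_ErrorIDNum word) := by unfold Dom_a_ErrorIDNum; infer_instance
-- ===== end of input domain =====

-- B replaces A's transition state machine by a first-character class guard plus two
-- independent existence scans; objective: simpler. Return value only, no side effects.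

-- ===== PORT A =====
-- the for-loop of the isalpha branch (state s, break modelled by returning 2 immediately)
def a_loopAlpha : List Char → Nat → Nat
  | [], s => s
  | c :: rest, s =>
    if PySem.Chars.isalpha c then a_loopAlpha rest 1
    else if s == 1 && PySem.Chars.isdigit c then 2
    else a_loopAlpha rest s

-- the for-loop of the isdigit branch
def a_loopDigit : List Char → Nat → Nat
  | [], s => s
  | c :: rest, s =>
    if PySem.Chars.isdigit c then a_loopDigit rest 1
    else if s == 1 && PySem.Chars.isalpha c then 2
    else a_loopDigit rest s

def a_ErrorIDNum (word : String) : Bool :=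
  let s : Nat := 0
  match PySem.Str.pyGet? word 0 with   -- word[0]; none = IndexError, excluded by Pre_
  | none => false
  | some c =>
    let s : Nat :=
      if PySem.Chars.isalpha c then a_loopAlpha word.toList 1
      else if PySem.Chars.isdigit c then a_loopDigit word.toList 1
      else s
    s == 2

-- ===== PORT B =====
def a_ErrorIDNum_alt (word : String) : Bool :=
  match PySem.Str.pyGet? word 0 with   -- first = word[0]; none = IndexError, excluded by Pre_
  | none => false
  | some first =>
    if !(PySem.Chars.isalpha first || PySem.Chars.isdigit first) then false
    else
      let hasAlpha := word.toList.any PySem.Chars.isalpha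
      let hasDigit := word.toList.any PySem.Chars.isdigit
      hasAlpha && hasDigit

-- ===== PRECONDITION & SPEC =====
-- Pre_ excludes only the empty string, on which A raises IndexError at word[0].
def Pre_a_ErrorIDNum (word : String) : Prop := word ≠ ""
instance (word : String) : Decidable (Pre_a_ErrorIDNum word) := by unfold Pre_a_ErrorIDNum; infer_instance
def pvWitness_a_ErrorIDNum : String := "a1"

def Spec_a_ErrorIDNum (word : String) (out : Bool) : Prop := out = a_ErrorIDNum_alt word
instance (word : String) (out : Bool) : Decidable (Spec_a_ErrorIDNum word out) := by unfold Spec_a_ErrorIDNum; infer_instance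

-- ===== CLAIM (what is proved, stated in full; the proofs are below) =====
def Claim_equal_a_ErrorIDNum : Prop := ∀ (word : String), Dom_a_ErrorIDNum word → Pre_a_ErrorIDNum word → Spec_a_ErrorIDNum word (a_ErrorIDNum word)

-- ===== LEMMAS AND PROOFS =====
theorem alpha_not_digit (c : Char) (h : PySem.Chars.isalpha c = true) :
    PySem.Chars.isdigit c = false := by
  revert h
  simp [PySem.Chars.isalpha, PySem.Chars.isdigit, PySem.Chars.isupper, PySem.Chars.islower,
        Char.le_def, UInt32.le_iff_toNat_le]
  rintro (⟨h1, h2⟩ | ⟨h1, h2⟩) h3 <;> omega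

theorem digit_not_alpha (c : Char) (h : PySem.Chars.isdigit c = true) :
    PySem.Chars.isalpha c = false := by
  cases ha : PySem.Chars.isalpha c
  · rfl
  · exact absurd h (by simp [alpha_not_digit c ha])

theorem loopAlpha_one (l : List Char) :
    a_loopAlpha l 1 = if l.any PySem.Chars.isdigit then 2 else 1 := by
  induction l with
  | nil => simp [a_loopAlpha]
  | cons c rest ih =>
    by_cases ha : PySem.Chars.isalpha c = true
    · simp [a_loopAlpha, ha, alpha_not_digit c ha, ih]
    · by_cases hd : PySem.Chars.isdigit c = true
      · simp [a_loopAlpha, ha, hd]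
      · simp [a_loopAlpha, ha, hd, ih]

theorem loopDigit_one (l : List Char) :
    a_loopDigit l 1 = if l.any PySem.Chars.isalpha then 2 else 1 := by
  induction l with
  | nil => simp [a_loopDigit]
  | cons c rest ih =>
    by_cases hd : PySem.Chars.isdigit c = true
    · simp [a_loopDigit, hd, digit_not_alpha c hd, ih]
    · by_cases ha : PySem.Chars.isalpha c = true
      · simp [a_loopDigit, hd, ha]
      · simp [a_loopDigit, hd, ha, ih]

-- ===== VERDICT (by name: the statement is the Claim_ definition above) =====
theorem a_ErrorIDNum_spec : Claim_equal_a_ErrorIDNum := by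
  intro word _hdom hpre
  unfold Spec_a_ErrorIDNum a_ErrorIDNum a_ErrorIDNum_alt
  have hne : word.toList ≠ [] := by
    simpa using hpre
  obtain ⟨c, rest, hcons⟩ := List.exists_cons_of_ne_nil hne
  have hget : PySem.Str.pyGet? word 0 = some c := by
    simp [PySem.Str.pyGet?, hcons, PySem.Chars.pyGet?_eq_listPyGet?, PySem.List.pyGet?,
          PySem.List.pyIdx?]
  rw [hget]
  by_cases ha : PySem.Chars.isalpha c = true
  · simp only [ha, hcons, loopAlpha_one, if_true]
    by_cases hd : (c :: rest).any PySem.Chars.isdigit <;> simp [ha, hd]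
  · by_cases hd : PySem.Chars.isdigit c = true
    · simp only [ha, hd, hcons, loopDigit_one, if_true, if_false, Bool.false_eq_true]
      by_cases h2 : (c :: rest).any PySem.Chars.isalpha <;> simp [hd, h2]
    · simp [ha, hd]
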